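-- pv_equiv track=rewrite | github.com/SAG145/Project-Euler | PEP315 - Digital Root Clocks.py | and_bin
-- ===== SOURCE A (Python) =====
-- def and_bin(d1,d2):
--     b1 = digital_list[d1]
--     b2 = digital_list[d2]
--     final = ""
--     for k in range(7):
--         if b1[k] == "1" and b2[k] == "1":
--             final += "1"
--         else:
--             final += "0"
--     return final
--
-- digital_list = ["1110111","0010010","1011101","1011011","0111010","1101011","1101111","1110010","1111111","1111011"]
-- ===== SOURCE B (Python) =====
-- digital_list = ["1110111","0010010","1011101","1011011","0111010","1101011","1101111","1110010","1111111","1111011"]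
--
-- def and_bin(d1, d2):
--     return format(int(digital_list[d1], 2) & int(digital_list[d2], 2), '07b')
-- ===== Notes on version B (the rewrite author's own statement) =====
-- stated objective: simpler
-- what changed: Replaces the per-character loop comparing '1' characters with a single native bitwise AND on the integer values of the two bit patterns, formatted back to a 7-character zero-padded binary string.
import Mathlib
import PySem

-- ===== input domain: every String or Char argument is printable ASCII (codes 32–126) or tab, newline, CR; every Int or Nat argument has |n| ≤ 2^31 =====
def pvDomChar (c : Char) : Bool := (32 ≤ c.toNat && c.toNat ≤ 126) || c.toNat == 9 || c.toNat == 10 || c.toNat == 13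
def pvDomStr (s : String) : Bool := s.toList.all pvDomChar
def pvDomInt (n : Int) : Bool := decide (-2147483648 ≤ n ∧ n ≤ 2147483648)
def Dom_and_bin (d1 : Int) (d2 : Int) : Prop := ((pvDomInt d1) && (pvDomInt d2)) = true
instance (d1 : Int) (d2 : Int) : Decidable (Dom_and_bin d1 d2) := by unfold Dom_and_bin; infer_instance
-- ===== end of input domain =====

-- B replaces A's per-character loop with one native bitwise AND of the patterns' integer
-- values, formatted back to a 7-character zero-padded binary string (objective: simpler).

def digitalList : List String :=
  ["1110111","0010010","1011101","1011011","0111010","1101011","1101111","1110010","1111111","1111011"]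

-- ===== PORT A =====
-- A: look up both patterns, then for k in range(7) append "1" iff both chars are "1".
-- Under Pre_ the lookups succeed; getD "" stands for the value pyGet? returns as some.
def and_bin (d1 : Int) (d2 : Int) : String :=
  let b1 := (PySem.List.pyGet? digitalList d1).getD ""
  let b2 := (PySem.List.pyGet? digitalList d2).getD ""
  (PySem.List.pyRange 0 7 1).foldl
    (fun final k =>
      if PySem.Str.pyGet? b1 k = some '1' ∧ PySem.Str.pyGet? b2 k = some '1' then
        final ++ "1"
      else
        final ++ "0") ""

-- ===== PORT B =====
-- int(s, 2) on the fixed '0'/'1' patterns: fold accumulating the binary value.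
def binVal (s : String) : Nat :=
  s.toList.foldl (fun acc c => 2 * acc + (if c = '1' then 1 else 0)) 0

-- format(n, '07b') for n < 2^7: the 7 bits, most significant first.
def format7b (n : Nat) : String :=
  String.ofList (((List.range 7).reverse).map (fun i => if n / 2 ^ i % 2 = 1 then '1' else '0'))

def and_bin_alt (d1 : Int) (d2 : Int) : String :=
  let b1 := (PySem.List.pyGet? digitalList d1).getD ""
  let b2 := (PySem.List.pyGet? digitalList d2).getD ""
  format7b (Nat.land (binVal b1) (binVal b2))

-- ===== PRECONDITION & SPEC =====
-- Pre_ excludes exactly the indices on which A's list indexing raises IndexError.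
def Pre_and_bin (d1 : Int) (d2 : Int) : Prop :=
  (-10 ≤ d1 ∧ d1 < 10) ∧ (-10 ≤ d2 ∧ d2 < 10)
instance (d1 : Int) (d2 : Int) : Decidable (Pre_and_bin d1 d2) := by unfold Pre_and_bin; infer_instance

def pvWitness_and_bin : Int × Int := (3, -2)

def Spec_and_bin (d1 : Int) (d2 : Int) (out : String) : Prop := out = and_bin_alt d1 d2
instance (d1 : Int) (d2 : Int) (out : String) : Decidable (Spec_and_bin d1 d2 out) := by unfold Spec_and_bin; infer_instance

-- ===== CLAIM (what is proved, stated in full; the proofs are below) =====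
def Claim_equal_and_bin : Prop := ∀ (d1 : Int) (d2 : Int), Dom_and_bin d1 d2 → Pre_and_bin d1 d2 → Spec_and_bin d1 d2 (and_bin d1 d2)

-- ===== LEMMAS AND PROOFS =====

-- ===== VERDICT (by name: the statement is the Claim_ definition above) =====
theorem and_bin_spec : Claim_equal_and_bin := by
  intro d1 d2 _ hpre
  obtain ⟨⟨h1, h2⟩, ⟨h3, h4⟩⟩ := hpre
  unfold Spec_and_bin
  interval_cases d1 <;> interval_cases d2 <;> decide
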